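-- pv_equiv track=rewrite | github.com/susankianim/game-competitiveness-checker | merge_insertion_sort.py | build_insertion_order
-- ===== SOURCE A (Python) =====
-- def jacobsthal_sequence(n):
--     seq = [1, 3]
--     while seq[-1] < n:
--         seq.append(seq[-2] * 2 + seq[-1])
--     return seq
--
-- def build_insertion_order(n):
--     if n <= 0:
--         return []
--     j_seq = jacobsthal_sequence(n)
--     order = []
--     prev = 0
--     for j in j_seq:
--         order.extend(range(prev + 1, j + 1)[::-1])
--         prev = j
--     # Subtract 1 from all to get 0-based indices
--     return [x - 1 for x in order if x - 1 < n]
-- ===== SOURCE B (Python) =====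
-- def build_insertion_order(n):
--     if n <= 0:
--         return []
--     res = []
--     for i in range(n):
--         k = max((3 * i + 1).bit_length() - 2, 0)
--         hi = ((1 << (k + 2)) + (1 if k % 2 else -1)) // 3
--         lo = ((1 << (k + 1)) - (1 if k % 2 else -1)) // 3 if k else 0
--         res.append(lo + min(hi, n) - 1 - i)
--     return res
-- ===== Notes on version B (the rewrite author's own statement) =====
-- stated objective: alternative
-- what changed: B computes each output element independently from its index: the Jacobsthal block containing i is found in closed form via (3*i+1).bit_length() and powers of two, and the element is an affine function of i within its block, so B has no running recurrence, no list concatenation, no reversal and no post-filter.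
import Mathlib
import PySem

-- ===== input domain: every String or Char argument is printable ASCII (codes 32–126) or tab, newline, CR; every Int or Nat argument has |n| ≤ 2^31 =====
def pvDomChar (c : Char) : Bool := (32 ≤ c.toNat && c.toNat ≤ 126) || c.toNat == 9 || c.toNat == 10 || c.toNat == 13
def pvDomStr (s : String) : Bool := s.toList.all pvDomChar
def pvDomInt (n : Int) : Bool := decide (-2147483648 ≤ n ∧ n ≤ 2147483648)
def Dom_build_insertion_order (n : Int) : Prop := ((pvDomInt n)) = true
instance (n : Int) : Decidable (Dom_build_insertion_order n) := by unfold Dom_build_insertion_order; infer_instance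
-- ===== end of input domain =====

-- B computes each output element independently from its index: the Jacobsthal block of i
-- is found in closed form via bit_length and powers of two, and the element is an affine
-- function of i inside its block — no recurrence, no concatenation, no reversal, no filter.
-- Objective: alternative (same O(n) cost).

-- ===== PORT A =====
-- the while-loop of jacobsthal_sequence: a = seq[-2], b = seq[-1]; proof args only make
-- the loop's termination provable (they carry no algorithmic content)
def jacLoop (n a b : Int) (ha : 0 < a) (hb : 0 < b) : List Int :=
  if h : b < n then (a * 2 + b) :: jacLoop n b (a * 2 + b) hb (by omega)
  else []
termination_by (n - b).toNat
decreasing_by omega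

def jacobsthal_sequence (n : Int) : List Int :=
  1 :: 3 :: jacLoop n 1 3 (by norm_num) (by norm_num)

def build_insertion_order (n : Int) : List Int :=
  if n ≤ 0 then []
  else
    let j_seq := jacobsthal_sequence n
    -- for j in j_seq: order.extend(range(prev+1, j+1)[::-1]); state = (order, prev)
    let p := j_seq.foldl
      (fun (st : List Int × Int) j =>
        (st.1 ++ (PySem.List.pyRange (st.2 + 1) (j + 1) 1).reverse, j)) ([], 0)
    (p.1.filter (fun x => decide (x - 1 < n))).map (fun x => x - 1)

-- ===== PORT B =====
-- the loop body of B, computing the output element at index i; Python's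
-- m.bit_length() for m ≥ 1 is Nat.log2 m + 1 (exact here: 3*i+1 ≥ 1 since i ≥ 0),
-- and 1 << e is 2 ^ e (e ≥ 0 here)
def altF (n i : Int) : Int :=
  let k : Int := max ((((3 * i + 1).toNat.log2 : Int) + 1) - 2) 0
  let s : Int := if PySem.Int.mod k 2 ≠ 0 then 1 else -1
  let hi : Int := PySem.Int.floordiv (2 ^ (k + 2).toNat + s) 3
  let lo : Int := if k ≠ 0 then PySem.Int.floordiv (2 ^ (k + 1).toNat - s) 3 else 0
  lo + min hi n - 1 - i

def build_insertion_order_alt (n : Int) : List Int :=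
  if n ≤ 0 then [] else (PySem.List.pyRange 0 n 1).map (altF n)

-- ===== PRECONDITION & SPEC =====
def Spec_build_insertion_order (n : Int) (out : List Int) : Prop := out = build_insertion_order_alt n
instance (n : Int) (out : List Int) : Decidable (Spec_build_insertion_order n out) := by unfold Spec_build_insertion_order; infer_instance

-- ===== CLAIM (what is proved, stated in full; the proofs are below) =====
def Claim_equal_build_insertion_order : Prop := ∀ (n : Int), Dom_build_insertion_order n → Spec_build_insertion_order n (build_insertion_order n)

-- ===== LEMMAS AND PROOFS =====

-- A's filter-and-shift postprocessing
def postA (n : Int) (l : List Int) : List Int :=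
  (l.filter (fun x => decide (x - 1 < n))).map (fun x => x - 1)

-- A's fold contribution, block by block
def contrib (js : List Int) (prev : Int) : List Int :=
  match js with
  | [] => []
  | j :: t => (PySem.List.pyRange (prev + 1) (j + 1) 1).reverse ++ contrib t j

-- the common normal form: concatenation of descending 0-based blocks
def gBlocks (n prev a b : Int) (h0 : 0 ≤ prev) (hpa : prev < a) (hab : a < b) : List Int :=
  if h : prev < n then
    (PySem.List.pyRange prev (min a n) 1).reverse
      ++ gBlocks n a b (2 * a + b) (by omega) hab (by omega)
  else []
termination_by (n - prev).toNat
decreasing_by omega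

theorem foldl_contrib (js : List Int) (o : List Int) (prev : Int) :
    (js.foldl
      (fun (st : List Int × Int) j =>
        (st.1 ++ (PySem.List.pyRange (st.2 + 1) (j + 1) 1).reverse, j)) (o, prev)).1
      = o ++ contrib js prev := by
  induction js generalizing o prev with
  | nil => simp [contrib]
  | cons j t ih => simp [contrib, ih, List.append_assoc]

theorem map_sub_one_pyRange (a b : Int) :
    (PySem.List.pyRange a b 1).map (fun x => x - 1)
      = PySem.List.pyRange (a - 1) (b - 1) 1 := by
  simp only [PySem.List.pyRange_one, List.map_map]
  have h : b - 1 - (a - 1) = b - a := by ring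
  rw [h]
  congr 1
  funext k
  simp
  omega

theorem postA_block (n prev a : Int) (hpa : prev < a) (hpn : prev < n) :
    postA n ((PySem.List.pyRange (prev + 1) (a + 1) 1).reverse)
      = (PySem.List.pyRange prev (min a n) 1).reverse := by
  unfold postA
  rw [List.filter_reverse, List.map_reverse]
  congr 1
  rw [PySem.List.pyRange_one_append (prev + 1) (min a n + 1) (a + 1) (by omega) (by omega)]
  rw [List.filter_append]
  have h1 : (PySem.List.pyRange (prev + 1) (min a n + 1) 1).filter (fun x => decide (x - 1 < n))
      = PySem.List.pyRange (prev + 1) (min a n + 1) 1 := by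
    apply List.filter_eq_self.mpr
    intro x hx
    rw [PySem.List.mem_pyRange_one] at hx
    simp
    omega
  have h2 : (PySem.List.pyRange (min a n + 1) (a + 1) 1).filter (fun x => decide (x - 1 < n))
      = [] := by
    apply List.filter_eq_nil_iff.mpr
    intro x hx
    rw [PySem.List.mem_pyRange_one] at hx
    simp
    omega
  rw [h1, h2, List.append_nil]
  have := map_sub_one_pyRange (prev + 1) (min a n + 1)
  simpa using this

theorem postA_block_nil (n prev a : Int) (hn : n ≤ prev) :
    postA n ((PySem.List.pyRange (prev + 1) (a + 1) 1).reverse) = [] := by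
  unfold postA
  rw [List.filter_reverse]
  have h : (PySem.List.pyRange (prev + 1) (a + 1) 1).filter (fun x => decide (x - 1 < n))
      = [] := by
    apply List.filter_eq_nil_iff.mpr
    intro x hx
    rw [PySem.List.mem_pyRange_one] at hx
    simp
    omega
  rw [h]
  rfl

theorem postA_append (n : Int) (x y : List Int) :
    postA n (x ++ y) = postA n x ++ postA n y := by
  unfold postA
  rw [List.filter_append, List.map_append]

theorem mainA (n prev a b : Int) (h0 : 0 ≤ prev) (hpa : prev < a) (hab : a < b) :
    postA n (contrib (a :: b :: jacLoop n a b (by omega) (by omega)) prev)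
      = gBlocks n prev a b h0 hpa hab := by
  by_cases hpn : prev < n
  · rw [gBlocks, dif_pos hpn]
    by_cases hbn : b < n
    · rw [jacLoop, dif_pos hbn]
      simp only [contrib]
      rw [postA_append, postA_block n prev a hpa hpn]
      have hc : a * 2 + b = 2 * a + b := by ring
      simp only [hc]
      congr 1
      exact mainA n a b (2 * a + b) (by omega) hab (by omega)
    · rw [jacLoop, dif_neg hbn]
      simp only [contrib, List.append_nil]
      rw [postA_append, postA_block n prev a hpa hpn]
      congr 1
      rw [gBlocks]
      by_cases han : a < n
      · rw [dif_pos han, postA_block n a b hab han]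
        rw [gBlocks, dif_neg (show ¬ b < n by omega), List.append_nil]
      · rw [dif_neg han, postA_block_nil n a b (by omega)]
  · rw [gBlocks, dif_neg hpn]
    rw [jacLoop, dif_neg (show ¬ b < n by omega)]
    simp only [contrib, List.append_nil]
    rw [postA_append, postA_block_nil n prev a (by omega), postA_block_nil n a b (by omega)]
    rfl
termination_by (n - prev).toNat
decreasing_by omega

-- ---- B-side: the Jacobsthal boundary sequence 1, 3, 5, 11, … and its closed form ----
def tJ : Nat → Int
  | 0 => 1
  | 1 => 3
  | (k+2) => 2 * tJ k + tJ (k+1)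

-- the lower boundary of block k (0 for the first block)
def loJ (k : Nat) : Int := match k with | 0 => 0 | (m+1) => tJ m

theorem tJ_closed (k : Nat) : 3 * tJ k = 2 ^ (k + 2) + (if k % 2 = 0 then -1 else 1) := by
  induction k using Nat.strong_induction_on with
  | _ k ih =>
    match k with
    | 0 => norm_num [tJ]
    | 1 => norm_num [tJ]
    | (m+2) =>
      have h1 := ih m (by omega)
      have h2 := ih (m+1) (by omega)
      have hm : (m + 2) % 2 = m % 2 := by omega
      have hm1 : (m + 1) % 2 = 1 - m % 2 := by omega
      rw [hm1] at h2
      have hp : (2:Int) ^ (m + 2 + 2) = 4 * 2 ^ (m + 2) := by ring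
      have hp1 : (2:Int) ^ (m + 1 + 2) = 2 * 2 ^ (m + 2) := by ring
      rw [tJ, hm, hp]
      rw [hp1] at h2
      rcases Nat.mod_two_eq_zero_or_one m with h | h <;> simp [h] at * <;> omega

theorem tJ_pos (k : Nat) : 1 ≤ tJ k := by
  have h := tJ_closed k
  have : (4:Int) ≤ 2 ^ (k + 2) := by
    calc (4:Int) = 2 ^ 2 := by norm_num
    _ ≤ 2 ^ (k + 2) := by apply pow_le_pow_right₀ <;> omega
  split at h <;> omega

theorem tJ_lt (k : Nat) : tJ k < tJ (k + 1) := by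
  have h := tJ_closed k
  have h1 := tJ_closed (k + 1)
  have hm : (k + 1) % 2 = 1 - k % 2 := by omega
  rw [hm] at h1
  have hp : (2:Int) ^ (k + 1 + 2) = 2 * 2 ^ (k + 2) := by ring
  rw [hp] at h1
  have : (4:Int) ≤ 2 ^ (k + 2) := by
    calc (4:Int) = 2 ^ 2 := by norm_num
    _ ≤ 2 ^ (k + 2) := by apply pow_le_pow_right₀ <;> omega
  rcases Nat.mod_two_eq_zero_or_one k with h' | h' <;> simp [h'] at * <;> omega

theorem loJ_lt (k : Nat) : loJ k < tJ k := by
  cases k with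
  | zero => simp [loJ, tJ]
  | succ m => simpa [loJ] using tJ_lt m

-- the pointwise closed form: for i inside block k (and i < n), the element B emits
theorem altF_at (n i : Int) (k : Nat) (hlo : loJ k ≤ i) (hhi : i < tJ k) (hin : i < n) :
    altF n i = loJ k + min (tJ k) n - 1 - i := by
  cases k with
  | zero =>
    have hi0 : i = 0 := by simp [loJ] at hlo; simp [tJ] at hhi; omega
    subst hi0
    simp only [altF, loJ]
    norm_num [PySem.Int.mod, PySem.Int.floordiv]
    rw [show ((2:Int) ^ Int.toNat 2 + -1).fdiv 3 = 1 by decide, show tJ 0 = 1 from rfl]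
  | succ m =>
    have hclo := tJ_closed m
    have hchi := tJ_closed (m + 1)
    have hp4 : (4:Int) ≤ 2 ^ (m + 2) := by
      calc (4:Int) = 2 ^ 2 := by norm_num
      _ ≤ 2 ^ (m + 2) := by apply pow_le_pow_right₀ <;> omega
    have hlo' : tJ m ≤ i := by simpa [loJ] using hlo
    have hipos : 1 ≤ i := le_trans (tJ_pos m) hlo'
    -- 2^(m+2) ≤ 3i+1 < 2^(m+3)
    have hb1 : (2:Int) ^ (m + 2) ≤ 3 * i + 1 := by split at hclo <;> omega
    have hb2 : 3 * i + 1 < (2:Int) ^ (m + 3) := by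
      have hm1 : (m + 1) % 2 = 1 - m % 2 := by omega
      rw [hm1] at hchi
      have hp : (2:Int) ^ (m + 1 + 2) = 2 ^ (m + 3) := by ring_nf
      rw [hp] at hchi
      rcases Nat.mod_two_eq_zero_or_one m with h' | h' <;> simp [h'] at hchi <;> omega
    -- hence bit_length(3i+1) = m+3, i.e. log2 = m+2
    have hlog : (3 * i + 1).toNat.log2 = m + 2 := by
      rw [Nat.log2_eq_log_two]
      apply Nat.log_eq_of_pow_le_of_lt_pow
      · have : ((2:Nat) ^ (m + 2) : Int) ≤ ((3 * i + 1).toNat : Int) := by push_cast; omega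
        exact_mod_cast this
      · have : (((3 * i + 1).toNat : Int)) < ((2:Nat) ^ (m + 3) : Int) := by push_cast; omega
        exact_mod_cast this
    simp only [altF, hlog]
    have hk : max ((((m + 2 : Nat) : Int) + 1) - 2) 0 = ((m : Int) + 1) := by push_cast; omega
    rw [hk]
    have hmod : PySem.Int.mod ((m : Int) + 1) 2 = ((m : Int) + 1) % 2 := by
      rw [PySem.Int.mod_eq_emod_of_pos] ; norm_num
    have htn2 : (((m : Int) + 1) + 2).toNat = m + 3 := by omega
    have htn1 : (((m : Int) + 1) + 1).toNat = m + 2 := by omega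
    rw [hmod, htn2, htn1]
    have hknz : ((m : Int) + 1) ≠ 0 := by omega
    simp only [hknz, ne_eq, ite_not]
    rcases Nat.mod_two_eq_zero_or_one m with h' | h'
    · -- m even, k = m+1 odd: s = 1
      have hs : ((m : Int) + 1) % 2 = 1 := by omega
      have hm1 : (m + 1) % 2 = 1 := by omega
      rw [hm1] at hchi; rw [h'] at hclo
      simp only [hs]
      norm_num
      have e1 : (2:Int) ^ (m + 3) + 1 = 3 * tJ (m + 1) := by
        have hp : (2:Int) ^ (m + 1 + 2) = 2 ^ (m + 3) := by ring_nf
        rw [hp] at hchi; simp at hchi; omega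
      have e2 : (2:Int) ^ (m + 2) - 1 = 3 * tJ m := by simp at hclo; omega
      rw [e1, e2, Int.mul_ediv_cancel_left _ (by norm_num : (3:Int) ≠ 0),
          Int.mul_ediv_cancel_left _ (by norm_num : (3:Int) ≠ 0)]
      simp [loJ]
    · -- m odd, k = m+1 even: s = -1
      have hs : ((m : Int) + 1) % 2 = 0 := by omega
      have hm1 : (m + 1) % 2 = 0 := by omega
      rw [hm1] at hchi; rw [h'] at hclo
      simp only [hs]
      norm_num
      have e1 : (2:Int) ^ (m + 3) + -1 = 3 * tJ (m + 1) := by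
        have hp : (2:Int) ^ (m + 1 + 2) = 2 ^ (m + 3) := by ring_nf
        rw [hp] at hchi; simp at hchi; omega
      have e2 : (2:Int) ^ (m + 2) + 1 = 3 * tJ m := by simp at hclo; omega
      rw [e1, e2, Int.mul_ediv_cancel_left _ (by norm_num : (3:Int) ≠ 0),
          Int.mul_ediv_cancel_left _ (by norm_num : (3:Int) ≠ 0)]
      simp [loJ]

-- mapping the in-block affine function over a range reverses it
theorem map_affine_reverse (p m : Int) :
    (PySem.List.pyRange p m 1).map (fun i => p + m - 1 - i)
      = (PySem.List.pyRange p m 1).reverse := by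
  simp only [PySem.List.pyRange_one, List.map_map, ← List.map_reverse,
    List.range_eq_range', List.reverse_range', List.map_map]
  apply List.map_congr_left
  intro j hj
  rw [List.mem_range'_1] at hj
  simp only [Function.comp_apply]
  omega

theorem mainB (n : Int) (k : Nat) (prev a b : Int)
    (hp : prev = loJ k) (ha : a = tJ k) (hb : b = tJ (k + 1))
    (h0 : 0 ≤ prev) (hpa : prev < a) (hab : a < b) :
    (PySem.List.pyRange prev n 1).map (altF n) = gBlocks n prev a b h0 hpa hab := by
  subst hp ha hb
  by_cases hpn : loJ k < n
  · rw [gBlocks, dif_pos hpn]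
    rw [PySem.List.pyRange_one_append (loJ k) (min (tJ k) n) n (by omega) (by omega),
        List.map_append]
    have hfst : (PySem.List.pyRange (loJ k) (min (tJ k) n) 1).map (altF n)
        = (PySem.List.pyRange (loJ k) (min (tJ k) n) 1).reverse := by
      rw [← map_affine_reverse (loJ k) (min (tJ k) n)]
      apply List.map_congr_left
      intro i hi
      rw [PySem.List.mem_pyRange_one] at hi
      rw [altF_at n i k (by omega) (by omega) (by omega)]
    rw [hfst]
    congr 1
    by_cases htn : tJ k < n
    · rw [show min (tJ k) n = tJ k by omega]
      exact mainB n (k + 1) (tJ k) (tJ (k + 1)) (2 * tJ k + tJ (k + 1)) rfl rfl rfl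
        (by have := tJ_pos k; omega) (tJ_lt k) (by have := tJ_pos k; have := tJ_lt (k + 1); omega)
    · rw [show min (tJ k) n = n by omega, PySem.List.pyRange_one_eq_nil (le_refl n),
          List.map_nil, gBlocks, dif_neg (by omega)]
  · rw [gBlocks, dif_neg hpn, PySem.List.pyRange_one_eq_nil (by omega), List.map_nil]
termination_by (n - prev).toNat
decreasing_by
  have := loJ_lt k
  omega

-- ===== VERDICT (by name: the statement is the Claim_ definition above) =====
theorem build_insertion_order_spec : Claim_equal_build_insertion_order := by
  intro n _
  unfold Spec_build_insertion_order build_insertion_order build_insertion_order_alt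
  by_cases hn : n ≤ 0
  · simp [hn]
  · simp only [hn, if_false]
    have h1 := foldl_contrib (jacobsthal_sequence n) [] 0
    have h2 := mainA n 0 1 3 le_rfl (by norm_num) (by norm_num)
    have h3 := mainB n 0 0 1 3 rfl rfl rfl le_rfl (by norm_num) (by norm_num)
    exact (congrArg (postA n) h1).trans (h2.trans h3.symm)
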